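-- pv_equiv track=rewrite | github.com/kalkbrennerei/maniplib | maniplib/manipulation_utils.py | get_strength_order_lex
-- ===== SOURCE A (Python) =====
-- def get_strength_order_lex(scoremap):
-- 	'''
-- 	sort candidates according to voters preferences and lex_tb
--
-- 	:param scoremap: mapping from candidates to scores (dict)
--
-- 	:returns: candidate indices, strongest candidates in the front
-- 	:rtype: list
-- 	'''
-- 	strength_order = []
--
-- 	# sort scores descending
-- 	scores = list(set(scoremap.values()))
-- 	scores.sort(reverse=True)
--
-- 	# check how many candidates with the same score exist
-- 	for score in scores:
-- 		same_score = list(filter(lambda xy : xy[1]==score, scoremap.items()))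
-- 		if len(same_score)==1:
-- 			strength_order.append(same_score[0][0])
-- 		else:
-- 			# perform tie-breaking for more than one candidate with the same score
-- 			# sort by index for lexicographic tie-breaking
-- 			tb = sorted([x[0] for x in same_score])
-- 			strength_order.extend(tb)
--
-- 	return strength_order
-- ===== SOURCE B (Python) =====
-- def get_strength_order_lex(scoremap):
-- 	'''
-- 	sort candidates according to voters preferences and lex_tb
--
-- 	:param scoremap: mapping from candidates to scores (dict)
--
-- 	:returns: candidate indices, strongest candidates in the front
-- 	:rtype: list
-- 	'''
-- 	# one sort: score descending, candidate index ascending on ties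
-- 	return [c for c, s in sorted(scoremap.items(), key=lambda cs: (-cs[1], cs[0]))]
-- ===== Notes on version B (the rewrite author's own statement) =====
-- stated objective: idiomatic
-- what changed: Replaces the loop over distinct scores with a per-score filter scan (plus per-group tie-break sort) by one single sorted() call over the items with key (-score, candidate).
import Mathlib
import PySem

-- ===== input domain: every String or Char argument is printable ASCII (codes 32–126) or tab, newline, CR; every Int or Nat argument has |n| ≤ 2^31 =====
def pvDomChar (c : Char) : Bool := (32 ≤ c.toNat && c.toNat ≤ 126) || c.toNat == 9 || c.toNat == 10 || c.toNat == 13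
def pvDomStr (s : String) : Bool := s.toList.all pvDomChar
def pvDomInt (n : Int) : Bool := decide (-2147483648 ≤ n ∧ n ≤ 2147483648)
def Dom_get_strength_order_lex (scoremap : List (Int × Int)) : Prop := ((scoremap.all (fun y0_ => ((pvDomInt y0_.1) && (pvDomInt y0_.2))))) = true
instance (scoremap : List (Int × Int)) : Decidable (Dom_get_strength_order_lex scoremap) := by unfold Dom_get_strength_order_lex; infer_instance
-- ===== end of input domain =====

-- B replaces A's loop over distinct scores with per-score filter scans by ONE sort of the
-- items under the key (-score, candidate) — an idiomatic single-sort formulation, same result.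

-- ===== PORT A =====
def get_strength_order_lex (scoremap : List (Int × Int)) : List Int :=
  let strength_order : List Int := []
  -- scores = list(set(scoremap.values())); scores.sort(reverse=True)  (no key: set order irrelevant)
  let scores := PySem.List.sorted (PySem.Set.ofList (scoremap.map (fun kv => kv.2))) (fun x => x) true
  scores.foldl (fun strength_order score =>
    let same_score := scoremap.filter (fun xy => xy.2 == score)
    if same_score.length == 1 then
      -- same_score[0][0]: guarded by the length == 1 test, so the default is unreachable
      strength_order ++ [(PySem.List.pyGetD same_score 0 (0, 0)).1]
    else
      let tb := PySem.List.sorted (same_score.map (fun x => x.1)) (fun k => k) false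
      strength_order ++ tb) strength_order

-- ===== PORT B =====
def get_strength_order_lex_alt (scoremap : List (Int × Int)) : List Int :=
  (PySem.List.sorted2 scoremap (fun cs => -cs.2) (fun cs => cs.1) false).map (fun cs => cs.1)

-- ===== PRECONDITION & SPEC =====
-- Pre_ excludes association lists with duplicate candidate keys: they cannot arise from the
-- Python dict parameter, and the list-level reading of such an input is ambiguous.
def Pre_get_strength_order_lex (scoremap : List (Int × Int)) : Prop :=
  (scoremap.map Prod.fst).Nodup
instance (scoremap : List (Int × Int)) : Decidable (Pre_get_strength_order_lex scoremap) := by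
  unfold Pre_get_strength_order_lex; infer_instance
def pvWitness_get_strength_order_lex : (List (Int × Int)) := [(0, 5), (1, 3), (2, 5)]
def Spec_get_strength_order_lex (scoremap : List (Int × Int)) (out : List Int) : Prop := out = get_strength_order_lex_alt scoremap
instance (scoremap : List (Int × Int)) (out : List Int) : Decidable (Spec_get_strength_order_lex scoremap out) := by unfold Spec_get_strength_order_lex; infer_instance

-- ===== CLAIM (what is proved, stated in full; the proofs are below) =====
def Claim_equal_get_strength_order_lex : Prop := ∀ (scoremap : List (Int × Int)), Dom_get_strength_order_lex scoremap → Pre_get_strength_order_lex scoremap → Spec_get_strength_order_lex scoremap (get_strength_order_lex scoremap)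

-- ===== LEMMAS AND PROOFS =====

-- the canonical pair-level result: groups of equal score, scores descending, candidates ascending inside a group
def pvScores (scoremap : List (Int × Int)) : List Int :=
  PySem.List.sorted (PySem.Set.ofList (scoremap.map (fun kv => kv.2))) (fun x => x) true
def pvGroups (scoremap : List (Int × Int)) : List (Int × Int) :=
  (pvScores scoremap).flatMap
    (fun s => PySem.List.sorted (scoremap.filter (fun xy => xy.2 == s)) (fun p => p.1) false)

theorem pv_lex_bool (a b : Int × Int) :
    (decide (-a.2 < -b.2) || (!decide (-b.2 < -a.2) && decide (a.1 < b.1)))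
      = decide (toLex ((-a.2 : Int), a.1) < toLex ((-b.2 : Int), b.1)) := by
  rcases lt_trichotomy (-a.2 : Int) (-b.2) with h | h | h <;>
    simp [Prod.Lex.lt_iff, h, not_lt_of_gt]

-- B's tuple-key sort is the sort under the lexicographic key (-score, candidate)
theorem pv_sorted2_lex (xs : List (Int × Int)) :
    PySem.List.sorted2 xs (fun p => -p.2) (fun p => p.1) false
      = PySem.List.sorted xs (fun p => toLex ((-p.2 : Int), p.1)) false := by
  have hfun : (fun a b : Int × Int =>
      decide (-a.2 < -b.2) || (!decide (-b.2 < -a.2) && decide (a.1 < b.1)))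
      = (fun a b : Int × Int => decide (toLex ((-a.2 : Int), a.1) < toLex ((-b.2 : Int), b.1))) := by
    funext a b; exact pv_lex_bool a b
  simp only [PySem.List.sorted2, PySem.List.sorted, if_neg (by decide : ¬ (false = true)), hfun]

theorem pv_map_insertBy {α β : Type} (f : α → β) (b : α → α → Bool) (b' : β → β → Bool)
    (h : ∀ p q, b p q = b' (f p) (f q)) (x : α) (l : List α) :
    (PySem.List.insertBy b x l).map f = PySem.List.insertBy b' (f x) (l.map f) := by
  induction l with
  | nil => rfl
  | cons y ys ih =>
      simp only [PySem.List.insertBy, List.map_cons]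
      rw [← h]
      by_cases hb : b x y = true
      · simp [hb]
      · simp only [hb, if_false, Bool.false_eq_true, List.map_cons, ih]

theorem pv_map_foldl_insertBy {α β : Type} (f : α → β) (b : α → α → Bool) (b' : β → β → Bool)
    (h : ∀ p q, b p q = b' (f p) (f q)) (l : List α) : ∀ (acc : List α),
    (l.foldl (fun acc x => PySem.List.insertBy b x acc) acc).map f
      = (l.map f).foldl (fun acc x => PySem.List.insertBy b' x acc) (acc.map f) := by
  induction l with
  | nil => intro acc; rfl
  | cons y ys ih =>
      intro acc
      simp only [List.foldl_cons, List.map_cons, ih, pv_map_insertBy f b b' h]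

-- sorting pairs by first component and then projecting = projecting and then sorting
theorem pv_map_fst_sorted (l : List (Int × Int)) :
    (PySem.List.sorted l (fun p => p.1) false).map Prod.fst
      = PySem.List.sorted (l.map Prod.fst) (fun k => k) false := by
  rw [PySem.List.sorted_eq_foldl_insertBy, PySem.List.sorted_eq_foldl_insertBy]
  exact pv_map_foldl_insertBy Prod.fst (fun a b => decide (a.1 < b.1))
    (fun a b => decide (a < b)) (fun p q => rfl) l []

theorem pv_flatMap_perm_congr {α β : Type} (ss : List α) (f g : α → List β)
    (h : ∀ s ∈ ss, (f s).Perm (g s)) : (ss.flatMap f).Perm (ss.flatMap g) := by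
  induction ss with
  | nil => rfl
  | cons s ss ih =>
      simp only [List.flatMap_cons]
      exact (h s (by simp)).append (ih (fun t ht => h t (by simp [ht])))

theorem pv_flatMap_congr_mem {α β : Type} (ss : List α) (f g : α → List β)
    (h : ∀ s ∈ ss, f s = g s) : ss.flatMap f = ss.flatMap g := by
  induction ss with
  | nil => rfl
  | cons s ss ih =>
      simp only [List.flatMap_cons, h s (by simp)]
      rw [ih (fun t ht => h t (by simp [ht]))]

-- concatenating, over distinct scores covering all values, the elements with that score is a permutation
theorem pv_flatMap_filter_perm (ss : List Int) (l : List (Int × Int)) (hnd : ss.Nodup)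
    (hall : ∀ p ∈ l, p.2 ∈ ss) :
    (ss.flatMap (fun s => l.filter (fun p => p.2 == s))).Perm l := by
  induction ss generalizing l with
  | nil =>
      have : l = [] := by
        cases l with
        | nil => rfl
        | cons p t => exact absurd (hall p (by simp)) (by simp)
      simp [this]
  | cons s ss ih =>
      simp only [List.flatMap_cons]
      have hs : s ∉ ss := (List.nodup_cons.mp hnd).1
      have hgroups : ss.flatMap (fun t => l.filter (fun p => p.2 == t))
          = ss.flatMap (fun t => (l.filter (fun p => !(p.2 == s))).filter (fun p => p.2 == t)) := by
        refine pv_flatMap_congr_mem _ _ _ (fun t ht => ?_)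
        rw [List.filter_filter]
        refine List.filter_congr (fun p _ => ?_)
        have hts : t ≠ s := fun hts => hs (hts ▸ ht)
        by_cases hp : p.2 = t
        · simp [hp, hts]
        · simp [hp]
      rw [hgroups]
      have hrest : (ss.flatMap (fun t => (l.filter (fun p => !(p.2 == s))).filter (fun p => p.2 == t))).Perm
          (l.filter (fun p => !(p.2 == s))) := by
        refine ih (l.filter (fun p => !(p.2 == s))) (List.nodup_cons.mp hnd).2 (fun p hp => ?_)
        rcases List.mem_filter.mp hp with ⟨hpl, hps⟩
        have := hall p hpl
        simp only [List.mem_cons] at this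
        rcases this with h1 | h1
        · simp [h1] at hps
        · exact h1
      exact (List.Perm.append_left _ hrest).trans (List.filter_append_perm _ l)

theorem pv_scores_nodup (scoremap : List (Int × Int)) : (pvScores scoremap).Nodup :=
  (PySem.List.sorted_perm _ _ _).nodup_iff.mpr (PySem.Set.nodup_ofList _)

theorem pv_mem_scores (scoremap : List (Int × Int)) (p : Int × Int) (hp : p ∈ scoremap) :
    p.2 ∈ pvScores scoremap := by
  unfold pvScores
  rw [PySem.List.mem_sorted, PySem.Set.mem_ofList]
  exact List.mem_map.mpr ⟨p, hp, rfl⟩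

theorem pv_groups_perm (scoremap : List (Int × Int)) :
    (pvGroups scoremap).Perm scoremap := by
  unfold pvGroups
  refine (pv_flatMap_perm_congr (pvScores scoremap)
      (fun s => PySem.List.sorted (scoremap.filter (fun xy => xy.2 == s)) (fun p => p.1) false)
      (fun s => scoremap.filter (fun p => p.2 == s))
      (fun s _ => PySem.List.sorted_perm _ _ _)).trans ?_
  exact pv_flatMap_filter_perm _ _ (pv_scores_nodup scoremap) (pv_mem_scores scoremap)

theorem pv_pairwise_flatMap {α β : Type} (R : β → β → Prop) (ss : List α) (f : α → List β)
    (h1 : ∀ s ∈ ss, (f s).Pairwise R)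
    (h2 : ss.Pairwise (fun s t => ∀ a ∈ f s, ∀ b ∈ f t, R a b)) :
    (ss.flatMap f).Pairwise R := by
  induction ss with
  | nil => simp
  | cons s ss ih =>
      rcases List.pairwise_cons.mp h2 with ⟨hcross, h2'⟩
      simp only [List.flatMap_cons, List.pairwise_append]
      refine ⟨h1 s (by simp), ih (fun t ht => h1 t (by simp [ht])) h2', fun a ha b hb => ?_⟩
      rcases List.mem_flatMap.mp hb with ⟨t, ht, hbt⟩
      exact hcross t ht a ha b hbt

theorem pv_group_snd (scoremap : List (Int × Int)) (s : Int) (p : Int × Int)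
    (hp : p ∈ PySem.List.sorted (scoremap.filter (fun xy => xy.2 == s)) (fun p => p.1) false) :
    p.2 = s := by
  rw [PySem.List.mem_sorted] at hp
  exact by simpa using (List.mem_filter.mp hp).2

theorem pv_groups_pairwise (scoremap : List (Int × Int))
    (hpre : (scoremap.map Prod.fst).Nodup) :
    (pvGroups scoremap).Pairwise
      (fun a b => toLex ((-a.2 : Int), a.1) < toLex ((-b.2 : Int), b.1)) := by
  unfold pvGroups
  refine pv_pairwise_flatMap _ _ _ (fun s _ => ?_) ?_
  · -- inside one group: equal second components, strictly increasing first components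
    have hle := PySem.List.sorted_pairwise (scoremap.filter (fun xy => xy.2 == s)) (fun p => p.1)
    have hnd : ((PySem.List.sorted (scoremap.filter (fun xy => xy.2 == s)) (fun p => p.1) false).map Prod.fst).Nodup := by
      refine ((PySem.List.sorted_perm _ _ _).map Prod.fst).nodup_iff.mpr ?_
      exact (List.Sublist.map Prod.fst (List.filter_sublist (l := scoremap))).nodup hpre
    have hne : (PySem.List.sorted (scoremap.filter (fun xy => xy.2 == s)) (fun p => p.1) false).Pairwise
        (fun a b => a.1 ≠ b.1) := List.pairwise_map.mp hnd
    refine (hle.and hne).imp_of_mem (fun {a b} ha hb hab => ?_)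
    rw [Prod.Lex.lt_iff]
    right
    have h2a := pv_group_snd scoremap s a ha
    have h2b := pv_group_snd scoremap s b hb
    constructor
    · simp [h2a, h2b]
    · exact lt_of_le_of_ne hab.1 hab.2
  · -- across groups: the scores are strictly descending
    have hge := PySem.List.sorted_pairwise_rev (PySem.Set.ofList (scoremap.map (fun kv => kv.2))) (fun x => x)
    have hne : (pvScores scoremap).Pairwise (fun a b => a ≠ b) := pv_scores_nodup scoremap
    have hgt : (pvScores scoremap).Pairwise (fun s t => t < s) :=
      (hge.and hne).imp (fun {s t} h => lt_of_le_of_ne h.1 (Ne.symm h.2))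
    refine hgt.imp (fun {s t} hst a ha b hb => ?_)
    rw [Prod.Lex.lt_iff]
    left
    have := pv_group_snd scoremap s a ha
    have := pv_group_snd scoremap t b hb
    simp_all

theorem pv_alt_eq_groups (scoremap : List (Int × Int))
    (hpre : (scoremap.map Prod.fst).Nodup) :
    get_strength_order_lex_alt scoremap = (pvGroups scoremap).map Prod.fst := by
  unfold get_strength_order_lex_alt
  rw [pv_sorted2_lex,
    PySem.List.sorted_eq_of_perm_of_pairwise_lt scoremap (pvGroups scoremap)
      (fun p => toLex ((-p.2 : Int), p.1)) (pv_groups_perm scoremap)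
      (pv_groups_pairwise scoremap hpre)]

theorem pv_a_eq_groups (scoremap : List (Int × Int)) :
    get_strength_order_lex scoremap = (pvGroups scoremap).map Prod.fst := by
  unfold get_strength_order_lex
  show (pvScores scoremap).foldl _ [] = _
  rw [PySem.List.foldl_congr_mem (pvScores scoremap) _
      (fun acc s => acc ++ (PySem.List.sorted (scoremap.filter (fun xy => xy.2 == s)) (fun p => p.1) false).map Prod.fst)
      [] ?_]
  · rw [PySem.List.foldl_append_eq_flatMap]
    simp [pvGroups, List.map_flatMap]
  · intro acc s hs
    simp only []
    by_cases hl : (scoremap.filter (fun xy => xy.2 == s)).length = 1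
    · obtain ⟨e, he⟩ := List.length_eq_one_iff.mp hl
      rw [if_pos (by simp [hl]), he]
      rfl
    · rw [if_neg (by simp [hl])]
      rw [pv_map_fst_sorted]

-- ===== VERDICT (by name: the statement is the Claim_ definition above) =====
theorem get_strength_order_lex_spec : Claim_equal_get_strength_order_lex := by
  intro scoremap _ hpre
  show _ = _
  rw [pv_a_eq_groups scoremap, pv_alt_eq_groups scoremap hpre]
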